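-- pv_equiv track=rewrite | github.com/actumn/problem-solving | jongman/python/9/9.9-tictactoe/main.py | bijection
-- ===== SOURCE A (Python) =====
-- def bijection(board):
--     ret = 0
--     for y in range(3):
--         for x in range(3):
--             ret = ret * 3
--             if board[y][x] == 'o':
--                 ret += 1
--             elif board[y][x] == 'x':
--                 ret += 2
--
--     return ret
-- ===== SOURCE B (Python) =====
-- def bijection(board):
--     # Build the number back-to-front: walk the cells in reverse row-major order,
--     # adding digit * power while the positional weight grows by *3 each step.
--     val = {'o': 1, 'x': 2}
--     total = 0
--     power = 1
--     for y in (2, 1, 0):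
--         for x in (2, 1, 0):
--             total += val.get(board[y][x], 0) * power
--             power *= 3
--     return total
-- ===== Notes on version B (the rewrite author's own statement) =====
-- stated objective: alternative
-- what changed: B builds the number back-to-front: it walks the cells in reverse row-major order keeping a (total, power) pair and adds digit*power with power growing by *3, instead of A's forward Horner accumulation ret = ret*3 + digit.
import Mathlib
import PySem

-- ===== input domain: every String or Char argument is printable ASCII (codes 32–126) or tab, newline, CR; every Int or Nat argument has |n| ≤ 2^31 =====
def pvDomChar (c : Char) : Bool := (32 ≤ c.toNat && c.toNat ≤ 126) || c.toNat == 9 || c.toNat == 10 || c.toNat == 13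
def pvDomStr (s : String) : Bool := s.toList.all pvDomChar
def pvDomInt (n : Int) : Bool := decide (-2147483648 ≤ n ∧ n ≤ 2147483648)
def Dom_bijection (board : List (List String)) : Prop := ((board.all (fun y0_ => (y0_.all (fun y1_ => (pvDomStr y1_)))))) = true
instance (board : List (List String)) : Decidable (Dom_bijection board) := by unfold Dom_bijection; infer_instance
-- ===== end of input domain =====

-- B builds the number back-to-front (reverse-order weighted sum with a growing power) instead of A's forward Horner accumulation (objective: alternative; same cost). Pre_ excludes boards on which A raises IndexError.


-- ===== PORT A =====
-- board[y][x] (IndexError = none, excluded by Pre_)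
def pvCell (board : List (List String)) (y x : Int) : Option String :=
  (PySem.List.pyGet? board y).bind (fun row => PySem.List.pyGet? row x)

-- body of A's inner loop: ret = ret*3; if/elif on board[y][x]
def pvStepA (ret : Int) (o : Option String) : Int :=
  match o with
  | some c => if c == "o" then ret * 3 + 1 else if c == "x" then ret * 3 + 2 else ret * 3
  | none => ret * 3

def bijection (board : List (List String)) : Int :=
  (PySem.List.pyRange 0 3 1).foldl (fun ret y =>
    (PySem.List.pyRange 0 3 1).foldl (fun ret x => pvStepA ret (pvCell board y x)) ret) 0

-- ===== PORT B =====
def pvValDict : PySem.Dict String Int := PySem.Dict.ofList [("o", 1), ("x", 2)]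

-- val.get(board[y][x], 0)  (none branch unreachable under Pre_)
def pvValB (o : Option String) : Int :=
  match o with
  | some c => PySem.Dict.getD pvValDict c 0
  | none => 0

-- body of B's inner loop on the (total, power) pair
def pvStepB (board : List (List String)) (st : Int × Int) (y x : Int) : Int × Int :=
  (st.1 + pvValB (pvCell board y x) * st.2, st.2 * 3)

def bijection_alt (board : List (List String)) : Int :=
  (([2, 1, 0] : List Int).foldl (fun st y =>
    (([2, 1, 0] : List Int).foldl (fun st x => pvStepB board st y x) st)) ((0 : Int), (1 : Int))).1

-- ===== PRECONDITION & SPEC =====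
-- Pre_ excludes exactly the boards on which A raises IndexError: fewer than 3 rows, or one of the first 3 rows shorter than 3.
def Pre_bijection (board : List (List String)) : Prop :=
  3 ≤ board.length ∧ ∀ row ∈ board.take 3, 3 ≤ row.length
instance (board : List (List String)) : Decidable (Pre_bijection board) := by unfold Pre_bijection; infer_instance
def pvWitness_bijection : List (List String) := [["o", "x", ""], ["", "o", "x"], ["x", "", "o"]]

def Spec_bijection (board : List (List String)) (out : Int) : Prop := out = bijection_alt board
instance (board : List (List String)) (out : Int) : Decidable (Spec_bijection board out) := by unfold Spec_bijection; infer_instance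

-- ===== CLAIM (what is proved, stated in full; the proofs are below) =====
def Claim_equal_bijection : Prop := ∀ (board : List (List String)), Dom_bijection board → Pre_bijection board → Spec_bijection board (bijection board)

-- ===== LEMMAS AND PROOFS =====
lemma pyRange03 : PySem.List.pyRange 0 3 1 = [0, 1, 2] := by decide

-- per-cell: A's Horner step equals ret*3 plus B's digit value
lemma step_val (r : Int) (o : Option String) : pvStepA r o = r * 3 + pvValB o := by
  cases o with
  | none => simp [pvStepA, pvValB]
  | some c =>
    by_cases ho : c == "o"
    · rw [beq_iff_eq] at ho; subst ho; simp [pvStepA, pvValB]; decide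
    · by_cases hx : c == "x"
      · rw [beq_iff_eq] at hx; subst hx; simp [pvStepA, pvValB, ho]; decide
      · rw [beq_iff_eq] at ho hx
        simp [pvStepA, pvValB, pvValDict, PySem.Dict.ofList, PySem.Dict.update,
          List.foldl, PySem.Dict.getD_insert, ho, hx]

-- ===== VERDICT (by name: the statement is the Claim_ definition above) =====
theorem bijection_spec : Claim_equal_bijection := by
  intro board _ _
  unfold Spec_bijection bijection bijection_alt
  simp only [pyRange03, List.foldl_cons, List.foldl_nil, step_val, pvStepB]
  ring
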